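-- pv_equiv track=rewrite | github.com/nkoranda97/Rosalind-problems | problems/genomeAssembly.py | findMerge
-- ===== SOURCE A (Python) =====
-- def findMerge(s1,ss):
--     middle = len(s1)//2
--     start = len(s1)
--     while start>middle:
--         if ss.endswith(s1[:start]):
--             return ss + s1[start:], True
--         start -=1
--     end = 0
--     while end < middle:
--         if ss.startswith(s1[end:]):
--             return s1[:end] + ss, True
--         end += 1
--     else:
--         return ss, False
-- ===== SOURCE B (Python) =====
-- def _pi_last(t):
--     # KMP prefix function of t; returns the length of the longest proper
--     # border (prefix that is also a suffix) of t.
--     pi = [0] * len(t)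
--     k = 0
--     for i in range(1, len(t)):
--         while k > 0 and t[i] != t[k]:
--             k = pi[k - 1]
--         if t[i] == t[k]:
--             k += 1
--         pi[i] = k
--     return k
--
--
-- def findMerge(s1, ss):
--     middle = len(s1) // 2
--     # longest k with ss.endswith(s1[:k]) -- via one linear KMP pass
--     k = _pi_last(s1 + "\x00" + ss)
--     if k > middle:
--         return ss + s1[k:], True
--     # longest L with ss[:L] == s1[len(s1)-L:] -- the other direction
--     end = len(s1) - _pi_last(ss + "\x00" + s1)
--     if end < middle:
--         return s1[:end] + ss, True
--     return ss, False
-- ===== Notes on version B (the rewrite author's own statement) =====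
-- stated objective: faster
-- what changed: A tries every candidate overlap length with a fresh endswith/startswith string comparison (quadratic); B computes the longest prefix/suffix overlaps in two linear KMP prefix-function passes over s1+'\x00'+ss and ss+'\x00'+s1 and then branches arithmetically.
import Mathlib
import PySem

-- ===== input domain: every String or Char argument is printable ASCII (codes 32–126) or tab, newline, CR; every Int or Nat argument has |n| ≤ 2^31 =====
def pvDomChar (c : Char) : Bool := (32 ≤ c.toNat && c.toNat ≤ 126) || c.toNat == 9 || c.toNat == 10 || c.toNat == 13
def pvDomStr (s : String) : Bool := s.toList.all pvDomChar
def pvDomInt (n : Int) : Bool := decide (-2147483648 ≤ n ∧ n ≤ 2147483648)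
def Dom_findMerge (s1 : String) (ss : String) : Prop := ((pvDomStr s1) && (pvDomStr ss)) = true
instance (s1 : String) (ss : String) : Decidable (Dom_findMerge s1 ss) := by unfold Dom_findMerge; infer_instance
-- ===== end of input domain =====

-- B replaces A's quadratic scan over candidate overlap lengths by two linear KMP
-- prefix-function passes (over s1+'\x00'+ss and ss+'\x00'+s1); equal return values on Dom.

-- ===== PORT A =====
-- first while loop: start = len(s1), while start > middle, testing ss.endswith(s1[:start])
def findMergeLoop1 (x y : List Char) (mid : Int) (start : Int) : Option (List Char × Bool) :=
  if h : mid < start then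
    if PySem.Chars.endswith y (PySem.Chars.slice x none (some start)) then
      some (y ++ PySem.Chars.slice x (some start) none, true)
    else
      findMergeLoop1 x y mid (start - 1)
  else none
termination_by (start - mid).toNat
decreasing_by omega

-- second while loop: end = 0, while end < middle, testing ss.startswith(s1[end:])
def findMergeLoop2 (x y : List Char) (mid : Int) (e : Int) : Option (List Char × Bool) :=
  if h : e < mid then
    if PySem.Chars.startswith y (PySem.Chars.slice x (some e) none) then
      some (PySem.Chars.slice x none (some e) ++ y, true)
    else
      findMergeLoop2 x y mid (e + 1)
  else none
termination_by (mid - e).toNat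
decreasing_by omega

def findMerge (s1 : String) (ss : String) : String × Bool :=
  let x := s1.toList
  let y := ss.toList
  let middle := PySem.Int.floordiv (PySem.Chars.len x) 2
  match findMergeLoop1 x y middle (PySem.Chars.len x) with
  | some r => (String.ofList r.1, r.2)
  | none =>
    match findMergeLoop2 x y middle 0 with
    | some r => (String.ofList r.1, r.2)
    | none => (ss, false)

-- ===== PORT B =====
-- the inner 'while k > 0 and t[i] != t[k]: k = pi[k-1]' of Source B; fuel only makes it
-- total (t.length steps always suffice, proved below)
def pvFall (t : List Char) (pi : List Nat) (c : Char) : Nat → Nat → Nat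
  | 0, k => k
  | fuel + 1, k =>
      if 0 < k ∧ c ≠ t.getD k ' ' then pvFall t pi c fuel (pi.getD (k - 1) 0) else k

-- one iteration of Source B's 'for i in range(1, len(t))' body
def pvPiStep (t : List Char) (st : List Nat × Nat) (i : Int) : List Nat × Nat :=
  let c := PySem.List.pyGetD t i ' '
  let k0 := pvFall t st.1 c t.length st.2
  let k := if c = t.getD k0 ' ' then k0 + 1 else k0
  (st.1.set i.toNat k, k)

-- _pi_last of Source B: KMP prefix function, returning the final k
def pvPiLast (t : List Char) : Nat :=
  ((PySem.List.pyRange 1 (PySem.Chars.len t)).foldl (pvPiStep t)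
    (List.replicate t.length 0, 0)).2

def findMerge_alt (s1 : String) (ss : String) : String × Bool :=
  let x := s1.toList
  let y := ss.toList
  let middle := PySem.Int.floordiv (PySem.Chars.len x) 2
  let k := pvPiLast (x ++ Char.ofNat 0 :: y)
  if (k : Int) > middle then
    (String.ofList (y ++ PySem.Chars.slice x (some (k : Int)) none), true)
  else
    let e : Int := PySem.Chars.len x - (pvPiLast (y ++ Char.ofNat 0 :: x) : Int)
    if e < middle then
      (String.ofList (PySem.Chars.slice x none (some e) ++ y), true)
    else (ss, false)

-- ===== PRECONDITION & SPEC =====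
def Spec_findMerge (s1 : String) (ss : String) (out : String × Bool) : Prop := out = findMerge_alt s1 ss
instance (s1 : String) (ss : String) (out : String × Bool) : Decidable (Spec_findMerge s1 ss out) := by unfold Spec_findMerge; infer_instance

-- ===== CLAIM (what is proved, stated in full; the proofs are below) =====
def Claim_equal_findMerge : Prop := ∀ (s1 : String) (ss : String), Dom_findMerge s1 ss → Spec_findMerge s1 ss (findMerge s1 ss)

-- ===== LEMMAS AND PROOFS =====

-- k is the length of a (proper) border of l: the prefix of length k is also a suffix
def BrdP (l : List Char) (k : Nat) : Prop := k < l.length ∧ l.take k <:+ l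

-- length of the longest proper border of l (0 for [])
def piSpec (l : List Char) : Nat :=
  Nat.findGreatest (fun k => k < l.length ∧ l.take k <:+ l) (l.length - 1)

theorem suffix_suffix_le {a b l : List Char} (ha : a <:+ l) (hb : b <:+ l)
    (h : a.length ≤ b.length) : a <:+ b := by
  obtain ⟨u, hu⟩ := ha
  obtain ⟨v, hv⟩ := hb
  have hlen : v.length ≤ u.length := by
    have h1 := congrArg List.length hu
    have h2 := congrArg List.length hv
    simp at h1 h2; omega
  refine ⟨u.drop v.length, ?_⟩
  have h1 := congrArg (List.drop v.length) (hu.trans hv.symm)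
  rwa [List.drop_append_of_le_length hlen, List.drop_left] at h1

theorem brd_le_piSpec {l : List Char} {k : Nat} (h : BrdP l k) : k ≤ piSpec l := by
  have h1 := h.1
  exact Nat.le_findGreatest (by omega) h

theorem piSpec_brd {l : List Char} (h : l ≠ []) : BrdP l (piSpec l) := by
  by_cases h0 : piSpec l = 0
  · rw [h0]
    exact ⟨List.length_pos_of_ne_nil h, by simp⟩
  · exact Nat.findGreatest_of_ne_zero
      (P := fun k => k < l.length ∧ l.take k <:+ l) (n := l.length - 1) rfl h0

theorem piSpec_lt {l : List Char} (h : l ≠ []) : piSpec l < l.length :=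
  (piSpec_brd h).1

theorem piSpec_eq_of {l : List Char} {m : Nat} (hm : BrdP l m)
    (hmax : ∀ j, BrdP l j → j ≤ m) : piSpec l = m := by
  have hne : l ≠ [] := by
    intro e; subst e; simpa using hm.1
  exact le_antisymm (hmax _ (piSpec_brd hne)) (brd_le_piSpec hm)

theorem brd_chain {l : List Char} {j k : Nat} (hk : BrdP l k) (hj : BrdP l j)
    (h : k < j) : BrdP (l.take j) k := by
  obtain ⟨hk1, hk2⟩ := hk
  obtain ⟨hj1, hj2⟩ := hj
  constructor
  · simp [List.length_take]; omega
  · have h1 : (l.take j).take k = l.take k := by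
      rw [List.take_take]; congr 1; omega
    rw [h1]
    exact suffix_suffix_le hk2 hj2 (by simp [List.length_take]; omega)

theorem brd_lift {l : List Char} {j k : Nat} (hj : BrdP l j)
    (hk : BrdP (l.take j) k) : BrdP l k := by
  obtain ⟨hj1, hj2⟩ := hj
  obtain ⟨hk1, hk2⟩ := hk
  have hkj : k < j := by simp [List.length_take] at hk1; omega
  constructor
  · omega
  · have h1 : l.take k = (l.take j).take k := by
      rw [List.take_take]; congr 1; omega
    rw [h1]; exact hk2.trans hj2

theorem brd_ext {l : List Char} {c : Char} {k : Nat} :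
    BrdP (l ++ [c]) (k + 1) ↔ BrdP l k ∧ l[k]? = some c := by
  constructor
  · rintro ⟨h1, h2⟩
    have hk : k < l.length := by simp at h1; omega
    have ht : (l ++ [c]).take (k + 1) = l.take k ++ [l[k]'hk] := by
      rw [List.take_append_of_le_length (by omega), List.take_add_one,
        List.getElem?_eq_getElem hk]
      rfl
    obtain ⟨u, hu⟩ := h2
    rw [ht, ← List.append_assoc] at hu
    obtain ⟨h3, h4⟩ := List.append_inj' hu (by simp)
    simp only [List.cons.injEq] at h4
    refine ⟨⟨hk, ⟨u, h3⟩⟩, ?_⟩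
    rw [List.getElem?_eq_getElem hk, h4.1]
  · rintro ⟨⟨hk, ⟨u, hu⟩⟩, h2⟩
    have hc : l[k]'hk = c := by
      rw [List.getElem?_eq_getElem hk] at h2; simpa using h2
    refine ⟨by simp; omega, ⟨u, ?_⟩⟩
    rw [List.take_append_of_le_length (by omega), List.take_add_one,
      List.getElem?_eq_getElem hk, hc, ← List.append_assoc, hu]
    rfl

theorem fall_spec (t : List Char) (c : Char) (i : Nat) (hi : i ≤ t.length) :
    ∀ (fuel k : Nat) (pi : List Nat), k < fuel →
    (∀ j, j < i → pi.getD j 0 = piSpec (t.take (j + 1))) →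
    BrdP (t.take i) k →
    (∀ j, BrdP (t.take i) j → t[j]? = some c → j ≤ k) →
    BrdP (t.take i) (pvFall t pi c fuel k) ∧
    (∀ j, BrdP (t.take i) j → t[j]? = some c → j ≤ pvFall t pi c fuel k) ∧
    (pvFall t pi c fuel k = 0 ∨ t[pvFall t pi c fuel k]? = some c) := by
  intro fuel
  induction fuel with
  | zero => intro k pi hf; exact absurd hf (Nat.not_lt_zero k)
  | succ fuel ih =>
    intro k pi hf hpi hb hmax
    have hklt : k < i := by
      have := hb.1; simp [List.length_take] at this; omega
    have hki : k < t.length := by omega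
    by_cases hcond : 0 < k ∧ c ≠ t.getD k ' '
    · have hrw : pvFall t pi c (fuel + 1) k = pvFall t pi c fuel (pi.getD (k - 1) 0) := by
        rw [pvFall, if_pos hcond]
      rw [hrw]
      have hpik : pi.getD (k - 1) 0 = piSpec (t.take k) := by
        have := hpi (k - 1) (by omega)
        rwa [Nat.sub_add_cancel hcond.1] at this
      have htk : (t.take i).take k = t.take k := by
        rw [List.take_take]; congr 1; omega
      have htkne : t.take k ≠ [] := by
        have hlt : (t.take k).length = k := by simp [List.length_take]; omega
        intro e; rw [e] at hlt; simp at hlt; omega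
      have hbk' : BrdP (t.take i) (pi.getD (k - 1) 0) := by
        apply brd_lift hb
        rw [htk, hpik]
        exact piSpec_brd htkne
      have hlt' : pi.getD (k - 1) 0 < k := by
        rw [hpik]
        have h5 := piSpec_lt htkne
        simp [List.length_take] at h5; omega
      apply ih _ pi (by omega) hpi hbk'
      intro j hbj hcj
      have hjk : j ≤ k := hmax j hbj hcj
      have hjne : j ≠ k := by
        intro e; subst e
        apply hcond.2
        rw [List.getD_eq_getElem?_getD, hcj]
        rfl
      have hbjk : BrdP (t.take k) j := by
        rw [← htk]; exact brd_chain hbj hb (by omega)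
      rw [hpik]; exact brd_le_piSpec hbjk
    · have hrw : pvFall t pi c (fuel + 1) k = k := by rw [pvFall, if_neg hcond]
      rw [hrw]
      refine ⟨hb, hmax, ?_⟩
      push Not at hcond
      by_cases hk0 : k = 0
      · exact Or.inl hk0
      · right
        have hcc := hcond (by omega)
        rw [List.getD_eq_getElem?_getD, List.getElem?_eq_getElem hki] at hcc
        simp only [Option.getD_some] at hcc
        rw [List.getElem?_eq_getElem hki, hcc]

theorem piStep_spec (t : List Char) (i : Nat) (h1 : 1 ≤ i) (h2 : i < t.length)
    (st : List Nat × Nat) (hlen : st.1.length = t.length)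
    (hk : st.2 = piSpec (t.take i))
    (hpi : ∀ j, j < i → st.1.getD j 0 = piSpec (t.take (j + 1))) :
    (pvPiStep t st (i : Int)).1.length = t.length ∧
    (pvPiStep t st (i : Int)).2 = piSpec (t.take (i + 1)) ∧
    (∀ j, j < i + 1 → (pvPiStep t st (i : Int)).1.getD j 0 = piSpec (t.take (j + 1))) := by
  have htine : t.take i ≠ [] := by
    have hlt : (t.take i).length = i := by simp [List.length_take]; omega
    intro e; rw [e] at hlt; simp at hlt; omega
  have hc : PySem.List.pyGetD t (i : Int) ' ' = t[i]'h2 := by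
    rw [PySem.List.pyGetD_natCast, List.getD_eq_getElem?_getD, List.getElem?_eq_getElem h2]
    rfl
  have hkfuel : st.2 < t.length := by
    rw [hk]
    have h5 := piSpec_lt htine
    simp [List.length_take] at h5; omega
  obtain ⟨hbf, hmaxf, hor⟩ :=
    fall_spec t (t[i]'h2) i (le_of_lt h2) t.length st.2 st.1 hkfuel hpi
      (hk ▸ piSpec_brd htine)
      (fun j hbj _ => hk ▸ brd_le_piSpec hbj)
  have hri : pvFall t st.1 (t[i]'h2) t.length st.2 < i := by
    have := hbf.1; simp [List.length_take] at this; omega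
  have hsucc : t.take (i + 1) = t.take i ++ [t[i]'h2] := by
    rw [List.take_add_one, List.getElem?_eq_getElem h2]
    rfl
  have hgetr : ∀ j : Nat, j < i → (t.take i)[j]? = t[j]? := by
    intro j hj
    rw [List.getElem?_take, if_pos hj]
  have hval :
      (if t[i]'h2 = t.getD (pvFall t st.1 (t[i]'h2) t.length st.2) ' '
        then pvFall t st.1 (t[i]'h2) t.length st.2 + 1
        else pvFall t st.1 (t[i]'h2) t.length st.2) = piSpec (t.take (i + 1)) := by
    set r := pvFall t st.1 (t[i]'h2) t.length st.2 with hr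
    have hrlen : r < t.length := by omega
    have hgd : t.getD r ' ' = t[r]'hrlen := by
      rw [List.getD_eq_getElem?_getD, List.getElem?_eq_getElem hrlen]
      rfl
    by_cases hcr : t[i]'h2 = t.getD r ' '
    · rw [if_pos hcr]
      symm
      rw [hsucc]
      apply piSpec_eq_of
      · rw [brd_ext]
        refine ⟨hbf, ?_⟩
        rw [hgetr r hri, List.getElem?_eq_getElem hrlen, ← hgd, ← hcr]
      · intro m hbm
        cases m with
        | zero => omega
        | succ m =>
          rw [brd_ext] at hbm
          obtain ⟨hbm', hcm⟩ := hbm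
          have hmi : m < i := by
            have := hbm'.1; simp [List.length_take] at this; omega
          have := hmaxf m hbm' (by rw [← hgetr m hmi]; exact hcm)
          omega
    · rw [if_neg hcr]
      have hr0 : r = 0 := by
        rcases hor with h | h
        · exact h
        · exfalso; apply hcr
          rw [List.getElem?_eq_getElem hrlen] at h
          rw [hgd]; exact (Option.some_inj.mp h).symm
      rw [hr0]
      symm
      rw [hsucc]
      apply piSpec_eq_of
      · refine ⟨by simp; omega, by simp⟩
      · intro m hbm
        cases m with
        | zero => omega
        | succ m =>
          exfalso
          rw [brd_ext] at hbm
          obtain ⟨hbm', hcm⟩ := hbm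
          have hmi : m < i := by
            have := hbm'.1; simp [List.length_take] at this; omega
          have hm0 : m = 0 := by
            have := hmaxf m hbm' (by rw [← hgetr m hmi]; exact hcm)
            omega
          subst hm0
          apply hcr
          have h0 : t[0]? = some (t[i]'h2) := by rw [← hgetr 0 (by omega)]; exact hcm
          rw [List.getElem?_eq_getElem (by omega : 0 < t.length)] at h0
          rw [hgd]
          have hre : t[r]? = t[0]? := by rw [hr0]
          rw [List.getElem?_eq_getElem hrlen,
            List.getElem?_eq_getElem (by omega : 0 < t.length)] at hre
          rw [Option.some_inj.mp hre]
          exact (Option.some_inj.mp h0).symm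
  refine ⟨?_, ?_, ?_⟩
  · simp [pvPiStep]; exact hlen
  · simp only [pvPiStep, hc]
    exact hval
  · intro j hj
    simp only [pvPiStep, hc]
    have htn : (i : Int).toNat = i := by simp
    rcases Nat.lt_or_ge j i with hji | hji
    · rw [List.getD_eq_getElem?_getD, htn, List.getElem?_set_ne (by omega),
        ← List.getD_eq_getElem?_getD]
      exact hpi j hji
    · have hji' : j = i := by omega
      subst hji'
      rw [List.getD_eq_getElem?_getD, htn,
        List.getElem?_set_self (by rw [hlen]; exact h2)]
      simpa using hval

theorem piLoop_inv (t : List Char) : ∀ m : Nat, 1 ≤ m → m ≤ t.length →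
    ((PySem.List.pyRange 1 (m : Int)).foldl (pvPiStep t) (List.replicate t.length 0, 0)).1.length = t.length ∧
    ((PySem.List.pyRange 1 (m : Int)).foldl (pvPiStep t) (List.replicate t.length 0, 0)).2 = piSpec (t.take m) ∧
    (∀ j, j < m → ((PySem.List.pyRange 1 (m : Int)).foldl (pvPiStep t) (List.replicate t.length 0, 0)).1.getD j 0 = piSpec (t.take (j + 1))) := by
  intro m
  induction m with
  | zero => intro h1 h2; exact absurd h1 (by omega)
  | succ m ih =>
    intro h1 h2
    by_cases hm : m = 0
    · subst hm
      have hr : PySem.List.pyRange 1 ((0 + 1 : Nat) : Int) = [] := by decide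
      rw [hr, List.foldl_nil]
      have htne : t.take 1 ≠ [] := by
        have hlt : (t.take 1).length = 1 := by simp [List.length_take]; omega
        intro e; rw [e] at hlt; simp at hlt
      have hps : piSpec (t.take 1) = 0 := by
        have h5 := piSpec_lt htne
        simp [List.length_take] at h5; omega
      refine ⟨by simp, by simpa using hps.symm, ?_⟩
      intro j hj
      have hj0 : j = 0 := by omega
      subst hj0
      rw [List.getD_eq_getElem?_getD, List.getElem?_replicate, if_pos (by omega)]
      simpa using hps.symm
    · have hm1 : 1 ≤ m := by omega
      obtain ⟨ih1, ih2, ih3⟩ := ih hm1 (by omega)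
      have hr : PySem.List.pyRange 1 ((m + 1 : Nat) : Int) =
          PySem.List.pyRange 1 ((m : Nat) : Int) ++ [((m : Nat) : Int)] := by
        push_cast
        exact PySem.List.pyRange_one_succ_right (by exact_mod_cast hm1)
      rw [hr, List.foldl_append, List.foldl_cons, List.foldl_nil]
      exact piStep_spec t m hm1 (by omega) _ ih1 ih2 ih3

theorem piLast_eq (t : List Char) : pvPiLast t = piSpec t := by
  rcases Nat.eq_zero_or_pos t.length with h0 | hpos
  · have ht : t = [] := List.eq_nil_of_length_eq_zero h0
    subst ht
    decide
  · obtain ⟨ih1, ih2, ih3⟩ := piLoop_inv t t.length hpos le_rfl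
    unfold pvPiLast
    rw [PySem.Chars.len_eq]
    rw [List.take_length] at ih2
    exact ih2

theorem brd_concat {x y : List Char} {sep : Char} (hx : sep ∉ x) (hy : sep ∉ y)
    (k : Nat) :
    BrdP (x ++ sep :: y) k ↔ k ≤ x.length ∧ k ≤ y.length ∧ x.take k <:+ y := by
  have hlen : (x ++ sep :: y).length = x.length + y.length + 1 := by simp; omega
  have hsep : ∀ i : Nat, (x ++ sep :: y)[i]? = some sep → i = x.length := by
    intro i hval
    rcases Nat.lt_trichotomy i x.length with hi | hi | hi
    · exfalso
      rw [List.getElem?_append_left hi] at hval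
      exact hx (List.mem_of_getElem? hval)
    · exact hi
    · exfalso
      rw [List.getElem?_append_right (by omega)] at hval
      have hd : i - x.length = (i - x.length - 1) + 1 := by omega
      rw [hd, List.getElem?_cons_succ] at hval
      exact hy (List.mem_of_getElem? hval)
  constructor
  · rintro ⟨hk1, hk2⟩
    have hkn : k ≤ x.length := by
      by_contra hkn
      push Not at hkn
      have hkT : ((x ++ sep :: y).take k).length = k := by
        simp [List.length_take]; omega
      have hdrop := List.suffix_iff_eq_drop.mp hk2
      rw [hkT] at hdrop
      have e1 : ((x ++ sep :: y).take k)[x.length]? = (x ++ sep :: y)[x.length]? := by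
        rw [List.getElem?_take, if_pos (by omega)]
      have hxn : (x ++ sep :: y)[x.length]? = some sep := by
        rw [List.getElem?_append_right le_rfl]
        simp
      have e3 : (x ++ sep :: y)[((x ++ sep :: y).length - k) + x.length]? = some sep := by
        rw [← List.getElem?_drop, ← hdrop, e1, hxn]
      have := hsep _ e3
      omega
    have htake : (x ++ sep :: y).take k = x.take k :=
      List.take_append_of_le_length hkn
    have hkm : k ≤ y.length := by
      by_contra hkm
      push Not at hkm
      have hkT : ((x ++ sep :: y).take k).length = k := by
        simp [List.length_take]; omega
      have hdrop := List.suffix_iff_eq_drop.mp hk2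
      rw [hkT] at hdrop
      have e1 : ((x ++ sep :: y).take k)[k - y.length - 1]? = x[k - y.length - 1]? := by
        rw [htake, List.getElem?_take, if_pos (by omega)]
      have hidx : ((x ++ sep :: y).length - k) + (k - y.length - 1) = x.length := by
        rw [hlen]; omega
      have hxn : (x ++ sep :: y)[((x ++ sep :: y).length - k) + (k - y.length - 1)]? = some sep := by
        rw [hidx, List.getElem?_append_right le_rfl]
        simp
      have e3 : x[k - y.length - 1]? = some sep := by
        rw [← e1, hdrop, List.getElem?_drop, hxn]
      exact hx (List.mem_of_getElem? e3)
    refine ⟨hkn, hkm, ?_⟩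
    have hyT : y <:+ x ++ sep :: y := ⟨x ++ [sep], by simp⟩
    rw [htake] at hk2
    apply suffix_suffix_le hk2 hyT
    simp [List.length_take]; omega
  · rintro ⟨h1, h2, h3⟩
    refine ⟨by rw [hlen]; omega, ?_⟩
    rw [List.take_append_of_le_length h1]
    exact h3.trans ⟨x ++ [sep], by simp⟩

theorem loop1_char {x y : List Char} {mid : Nat} {K : Nat}
    (hK1 : ∀ j : Nat, j ≤ x.length → x.take j <:+ y → j ≤ K)
    (hK2 : x.take K <:+ y) (hK3 : K ≤ x.length) :
    ∀ s : Nat, K ≤ s → s ≤ x.length →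
    findMergeLoop1 x y (mid : Int) (s : Int) =
      if mid < K then some (y ++ x.drop K, true) else none := by
  suffices h : ∀ d s : Nat, s - K = d → K ≤ s → s ≤ x.length →
      findMergeLoop1 x y (mid : Int) (s : Int) =
        if mid < K then some (y ++ x.drop K, true) else none by
    intro s h1 h2; exact h (s - K) s rfl h1 h2
  intro d
  induction d with
  | zero =>
    intro s hd h1 h2
    have hsK : s = K := by omega
    subst hsK
    rw [findMergeLoop1]
    by_cases hm : (mid : Int) < (s : Int)
    · rw [dif_pos hm]
      have hend : PySem.Chars.endswith y (PySem.Chars.slice x none (some (s : Int))) = true := by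
        rw [PySem.Chars.slice_eq_listSlice, PySem.List.slice_to_natCast]
        exact (PySem.Chars.endswith_iff _ _).mpr hK2
      rw [hend, if_pos rfl, PySem.Chars.slice_eq_listSlice, PySem.List.slice_from_natCast,
        if_pos (by exact_mod_cast hm)]
    · rw [dif_neg hm, if_neg (by exact_mod_cast hm)]
  | succ d ihd =>
    intro s hd h1 h2
    have hs : K < s := by omega
    rw [findMergeLoop1]
    by_cases hm : (mid : Int) < (s : Int)
    · rw [dif_pos hm]
      have hCs : ¬ x.take s <:+ y := by
        intro hc
        have := hK1 s h2 hc
        omega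
      have hend : PySem.Chars.endswith y (PySem.Chars.slice x none (some (s : Int))) = false := by
        rw [PySem.Chars.slice_eq_listSlice, PySem.List.slice_to_natCast]
        cases hE : PySem.Chars.endswith y (x.take s)
        · rfl
        · exact absurd ((PySem.Chars.endswith_iff _ _).mp hE) hCs
      rw [hend, if_neg (by simp)]
      have hcast : (s : Int) - 1 = ((s - 1 : Nat) : Int) := by omega
      rw [hcast]
      exact ihd (s - 1) (by omega) (by omega) (by omega)
    · rw [dif_neg hm]
      have hnm : ¬ mid < s := by exact_mod_cast hm
      rw [if_neg (by omega)]

theorem loop2_char {x y : List Char} {mid : Nat} {L : Nat} (hL : L ≤ x.length)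
    (hD : x.drop (x.length - L) <+: y)
    (hDmax : ∀ e : Nat, e < x.length - L → ¬ x.drop e <+: y) :
    ∀ e : Nat, e ≤ x.length - L →
    findMergeLoop2 x y (mid : Int) (e : Int) =
      if x.length - L < mid then some (x.take (x.length - L) ++ y, true) else none := by
  suffices h : ∀ d e : Nat, (x.length - L) - e = d → e ≤ x.length - L →
      findMergeLoop2 x y (mid : Int) (e : Int) =
        if x.length - L < mid then some (x.take (x.length - L) ++ y, true) else none by
    intro e he; exact h _ e rfl he
  intro d
  induction d with
  | zero =>
    intro e hd he
    have heL : e = x.length - L := by omega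
    subst heL
    rw [findMergeLoop2]
    by_cases hm : ((x.length - L : Nat) : Int) < (mid : Int)
    · rw [dif_pos hm]
      have hst : PySem.Chars.startswith y
          (PySem.Chars.slice x (some ((x.length - L : Nat) : Int)) none) = true := by
        rw [PySem.Chars.slice_eq_listSlice, PySem.List.slice_from_natCast]
        exact (PySem.Chars.startswith_iff _ _).mpr hD
      rw [hst, if_pos rfl, PySem.Chars.slice_eq_listSlice, PySem.List.slice_to_natCast,
        if_pos (by exact_mod_cast hm)]
    · rw [dif_neg hm, if_neg (by exact_mod_cast hm)]
  | succ d ihd =>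
    intro e hd he
    have heL : e < x.length - L := by omega
    rw [findMergeLoop2]
    by_cases hm : (e : Int) < (mid : Int)
    · rw [dif_pos hm]
      have hst : PySem.Chars.startswith y
          (PySem.Chars.slice x (some (e : Int)) none) = false := by
        rw [PySem.Chars.slice_eq_listSlice, PySem.List.slice_from_natCast]
        cases hE : PySem.Chars.startswith y (x.drop e)
        · rfl
        · exact absurd ((PySem.Chars.startswith_iff _ _).mp hE) (hDmax e heL)
      rw [hst, if_neg (by simp)]
      have hcast : (e : Int) + 1 = ((e + 1 : Nat) : Int) := by omega
      rw [hcast]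
      exact ihd (e + 1) (by omega) (by omega)
    · rw [dif_neg hm]
      have hnm : ¬ e < mid := by exact_mod_cast hm
      rw [if_neg (by omega)]

-- ===== VERDICT (by name: the statement is the Claim_ definition above) =====
theorem findMerge_spec : Claim_equal_findMerge := by
  intro s1 ss hdom
  unfold Spec_findMerge
  unfold Dom_findMerge at hdom
  rw [Bool.and_eq_true] at hdom
  have hsep1 : Char.ofNat 0 ∉ s1.toList := by
    intro hmem
    have h := List.all_eq_true.mp hdom.1 _ hmem
    exact absurd h (by decide)
  have hsep2 : Char.ofNat 0 ∉ ss.toList := by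
    intro hmem
    have h := List.all_eq_true.mp hdom.2 _ hmem
    exact absurd h (by decide)
  have hK := (brd_concat hsep1 hsep2 _).mp
    (piSpec_brd (by simp : s1.toList ++ Char.ofNat 0 :: ss.toList ≠ []))
  have hK1 : ∀ j : Nat, j ≤ s1.toList.length → s1.toList.take j <:+ ss.toList →
      j ≤ piSpec (s1.toList ++ Char.ofNat 0 :: ss.toList) := by
    intro j hj hsuf
    apply brd_le_piSpec
    rw [brd_concat hsep1 hsep2]
    refine ⟨hj, ?_, hsuf⟩
    have := hsuf.length_le
    rw [List.length_take] at this
    omega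
  have hL := (brd_concat hsep2 hsep1 _).mp
    (piSpec_brd (by simp : ss.toList ++ Char.ofNat 0 :: s1.toList ≠ []))
  have hD : s1.toList.drop (s1.toList.length - piSpec (ss.toList ++ Char.ofNat 0 :: s1.toList)) <+: ss.toList := by
    have h3 := hL.2.2
    have hlt : (ss.toList.take (piSpec (ss.toList ++ Char.ofNat 0 :: s1.toList))).length
        = piSpec (ss.toList ++ Char.ofNat 0 :: s1.toList) := by
      have h5 := hL.1
      rw [List.length_take]
      omega
    have h4 := List.suffix_iff_eq_drop.mp h3
    rw [hlt] at h4
    rw [← h4]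
    exact List.take_prefix _ _
  have hDmax : ∀ e : Nat,
      e < s1.toList.length - piSpec (ss.toList ++ Char.ofNat 0 :: s1.toList) →
      ¬ s1.toList.drop e <+: ss.toList := by
    intro e he hp
    have hlend : (s1.toList.drop e).length = s1.toList.length - e := by simp
    have htk := List.prefix_iff_eq_take.mp hp
    rw [hlend] at htk
    have hnm : s1.toList.length - e ≤ ss.toList.length := by
      have := hp.length_le
      rw [List.length_drop] at this
      omega
    have hb : BrdP (ss.toList ++ Char.ofNat 0 :: s1.toList) (s1.toList.length - e) := by
      rw [brd_concat hsep2 hsep1]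
      refine ⟨hnm, by omega, ?_⟩
      rw [← htk]
      exact List.drop_suffix _ _
    have := brd_le_piSpec hb
    omega
  have hA1 := loop1_char (mid := s1.toList.length / 2) hK1 hK.2.2 hK.1
    s1.toList.length hK.1 le_rfl
  have hA2 := loop2_char (mid := s1.toList.length / 2) hL.2.1 hD hDmax 0 (by omega)
  simp only [Nat.cast_zero] at hA2
  have hmid : PySem.Int.floordiv (PySem.Chars.len s1.toList) 2
      = ((s1.toList.length / 2 : Nat) : Int) := by
    rw [PySem.Chars.len_eq]
    exact_mod_cast PySem.Int.floordiv_natCast s1.toList.length 2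
  simp only [findMerge, findMerge_alt]
  rw [hmid, PySem.Chars.len_eq, piLast_eq, piLast_eq, hA1]
  by_cases hKm : s1.toList.length / 2 < piSpec (s1.toList ++ Char.ofNat 0 :: ss.toList)
  · rw [if_pos hKm, if_pos (by exact_mod_cast hKm), PySem.Chars.slice_eq_listSlice,
      PySem.List.slice_from_natCast]
  · rw [if_neg hKm, if_neg (by exact_mod_cast hKm), hA2]
    have hsub : (s1.toList.length : Int) - (piSpec (ss.toList ++ Char.ofNat 0 :: s1.toList) : Int)
        = ((s1.toList.length - piSpec (ss.toList ++ Char.ofNat 0 :: s1.toList) : Nat) : Int) := by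
      have := hL.2.1
      omega
    rw [hsub]
    by_cases hLm : s1.toList.length - piSpec (ss.toList ++ Char.ofNat 0 :: s1.toList)
        < s1.toList.length / 2
    · rw [if_pos hLm, if_pos (by exact_mod_cast hLm), PySem.Chars.slice_eq_listSlice,
        PySem.List.slice_to_natCast]
    · rw [if_neg hLm, if_neg (by exact_mod_cast hLm)]
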